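-- pv_equiv track=rewrite | github.com/MdAmzadAli/note-taking-app | backend_python/utils/chunkingUtils/text_processing.py | fix_character_spacing_line
-- ===== SOURCE A (Python) =====
-- def fix_character_spacing_line(line: str) -> str:
--     """Fix character spacing issues in a single line"""
--     if not line or len(line) < 10:
--         return line
--
--     # Check if line has excessive single character words
--     words = line.split()
--     if len(words) < 5:
--         return line
--
--     single_char_words = [w for w in words if len(w) == 1 and w.isalnum()]
--     single_char_ratio = len(single_char_words) / len(words)
--
--     if single_char_ratio > 0.4:  # More than 40% single characters
--         # Try to merge consecutive single characters
--         result_words = []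
--         i = 0
--         while i < len(words):
--             word = words[i]
--             if len(word) == 1 and word.isalnum():
--                 # Collect consecutive single characters
--                 char_sequence = [word]
--                 j = i + 1
--                 while (j < len(words) and
--                        len(words[j]) == 1 and
--                        words[j].isalnum()):
--                     char_sequence.append(words[j])
--                     j += 1
--
--                 # Merge if we have multiple consecutive single chars
--                 if len(char_sequence) > 1:
--                     merged_word = ''.join(char_sequence)
--                     result_words.append(merged_word)
--                     i = j
--                 else:
--                     result_words.append(word)
--                     i += 1
--             else:
--                 result_words.append(word)
--                 i += 1
--
--         return ' '.join(result_words)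
--
--     return line
-- ===== SOURCE B (Python) =====
-- def fix_character_spacing_line(line: str) -> str:
--     """Fix character spacing issues in a single line"""
--     if not line or len(line) < 10:
--         return line
--
--     words = line.split()
--     if len(words) < 5:
--         return line
--
--     def key(w):
--         return len(w) == 1 and w.isalnum()
--
--     single_char_words = [w for w in words if key(w)]
--     if len(single_char_words) / len(words) > 0.4:
--         # One pass: group words into maximal runs of equal key.
--         groups = []
--         for w in words:
--             k = key(w)
--             if groups and groups[-1][0] == k:
--                 groups[-1][1].append(w)
--             else:
--                 groups.append((k, [w]))
--         # Then transform each run: join a multi-word single-char run, keep the rest.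
--         out = []
--         for k, g in groups:
--             if k and len(g) > 1:
--                 out.append(''.join(g))
--             else:
--                 out.extend(g)
--         return ' '.join(out)
--
--     return line
-- ===== Notes on version B (the rewrite author's own statement) =====
-- stated objective: alternative
-- what changed: Replaces A's index-driven while-loop (which looks ahead with an inner while only at single-char words) by a uniform two-phase groupby-style decomposition: one pass partitioning the words into maximal runs of equal key (single-char-alnum or not), then a transform of each run (join a multi-word single-char run, keep every other run verbatim).
import Mathlib
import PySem

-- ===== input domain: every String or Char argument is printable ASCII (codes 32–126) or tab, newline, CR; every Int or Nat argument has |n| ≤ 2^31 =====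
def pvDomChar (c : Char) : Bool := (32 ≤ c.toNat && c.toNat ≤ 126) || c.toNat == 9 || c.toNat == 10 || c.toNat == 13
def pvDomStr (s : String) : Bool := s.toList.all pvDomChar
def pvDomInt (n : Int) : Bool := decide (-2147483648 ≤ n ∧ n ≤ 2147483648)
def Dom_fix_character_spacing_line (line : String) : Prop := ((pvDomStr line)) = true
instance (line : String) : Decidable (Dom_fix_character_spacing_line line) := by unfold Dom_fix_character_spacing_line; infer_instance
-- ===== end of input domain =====

-- B replaces A's index-driven while-loop (which scans ahead only at single-char words) by a
-- uniform two-phase decomposition — one pass grouping all words into maximal equal-key runs,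
-- then a transform of each run — same return value (objective: alternative decomposition).


-- ===== PORT A =====
-- 'len(w) == 1 and w.isalnum()'
def pvSingleA (w : String) : Bool := PySem.Str.len w == 1 && PySem.Str.strIsalnum w

-- the inner 'while' of A: collect the leading run of single-char alnum words, return (run, rest)
def pvCollectA : List String → List String × List String
  | [] => ([], [])
  | w :: rest =>
    if pvSingleA w then (w :: (pvCollectA rest).1, (pvCollectA rest).2)
    else ([], w :: rest)

theorem pvCollectA_snd_len (l : List String) : (pvCollectA l).2.length ≤ l.length := by
  induction l with
  | nil => simp [pvCollectA]
  | cons w rest ih =>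
    by_cases h : pvSingleA w = true <;> simp [pvCollectA, h]
    omega

-- the outer 'while i < len(words)' of A
def pvMergeA : List String → List String
  | [] => []
  | w :: rest =>
    if pvSingleA w then
      if (w :: (pvCollectA rest).1).length > 1 then
        PySem.Str.join "" (w :: (pvCollectA rest).1) :: pvMergeA (pvCollectA rest).2
      else
        w :: pvMergeA rest
    else
      w :: pvMergeA rest
termination_by l => l.length
decreasing_by
  · have := pvCollectA_snd_len rest; simp; omega
  · simp
  · simp

def fix_character_spacing_line (line : String) : String :=
  if line == "" || PySem.Str.len line < 10 then line
  else
    let words := PySem.Str.split₀ line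
    if words.length < 5 then line
    else
      let single_char_words := words.filter pvSingleA
      -- 'len(single_char_words) / len(words) > 0.4' (float) rendered exactly as the rational
      -- comparison 5*s > 2*n: the two agree for every word count a string can produce
      -- (float division only blurs the 0.4 threshold for denominators near 2^53).
      if 5 * single_char_words.length > 2 * words.length then
        PySem.Str.join " " (pvMergeA words)
      else line

-- ===== PORT B =====
-- 'key(w)' of Source B
def pvKeyB (w : String) : Bool := PySem.Str.len w == 1 && PySem.Str.strIsalnum w

-- one step of Source B's grouping pass: append w to the last run if its key matches, else start a run
def pvStepB (groups : List (Bool × List String)) (w : String) : List (Bool × List String) :=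
  match groups.getLast? with
  | some g => if g.1 == pvKeyB w then groups.dropLast ++ [(g.1, g.2 ++ [w])]
              else groups ++ [(pvKeyB w, [w])]
  | none => [(pvKeyB w, [w])]

-- transform of one run: join a multi-word single-char run, keep the rest
def pvEmitB (p : Bool × List String) : List String :=
  if p.1 && decide (p.2.length > 1) then [PySem.Str.join "" p.2] else p.2

def fix_character_spacing_line_alt (line : String) : String :=
  if line == "" || PySem.Str.len line < 10 then line
  else
    let words := PySem.Str.split₀ line
    if words.length < 5 then line
    else
      let single_char_words := words.filter pvKeyB
      -- same float-threshold rendering as in port A (see the comment there)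
      if 5 * single_char_words.length > 2 * words.length then
        PySem.Str.join " " (((words.foldl pvStepB []).flatMap pvEmitB))
      else line

-- ===== PRECONDITION & SPEC =====
def Spec_fix_character_spacing_line (line : String) (out : String) : Prop := out = fix_character_spacing_line_alt line
instance (line : String) (out : String) : Decidable (Spec_fix_character_spacing_line line out) := by unfold Spec_fix_character_spacing_line; infer_instance

-- ===== CLAIM (what is proved, stated in full; the proofs are below) =====
def Claim_equal_fix_character_spacing_line : Prop := ∀ (line : String), Dom_fix_character_spacing_line line → Spec_fix_character_spacing_line line (fix_character_spacing_line line)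

-- ===== LEMMAS AND PROOFS =====

-- proof-side reference form of B's grouping: maximal runs via takeWhile/dropWhile
def pvRuns : List String → List (Bool × List String)
  | [] => []
  | w :: rest =>
    (pvKeyB w, w :: rest.takeWhile (fun x => pvKeyB x == pvKeyB w)) ::
      pvRuns (rest.dropWhile (fun x => pvKeyB x == pvKeyB w))
termination_by l => l.length
decreasing_by
  have := List.length_dropWhile_le (fun x => pvKeyB x == pvKeyB w) rest
  simp; omega

theorem pvFoldl_step (l : List String) : ∀ (acc : List (Bool × List String)) (k : Bool) (g : List String),
    List.foldl pvStepB (acc ++ [(k, g)]) l =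
      acc ++ [(k, g ++ l.takeWhile (fun x => pvKeyB x == k))] ++ pvRuns (l.dropWhile (fun x => pvKeyB x == k)) := by
  induction l with
  | nil => intro acc k g; simp [pvRuns]
  | cons w l' ih =>
    intro acc k g
    by_cases hk : pvKeyB w = k
    · have hstep : pvStepB (acc ++ [(k, g)]) w = acc ++ [(k, g ++ [w])] := by
        simp [pvStepB, hk]
      simp only [List.foldl_cons, hstep, ih, List.takeWhile_cons, List.dropWhile_cons, hk]
      simp
    · have hstep : pvStepB (acc ++ [(k, g)]) w = (acc ++ [(k, g)]) ++ [(pvKeyB w, [w])] := by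
        simp [pvStepB, Ne.symm hk]
      simp only [List.foldl_cons, hstep, ih (acc ++ [(k, g)]) (pvKeyB w) [w],
        List.takeWhile_cons, List.dropWhile_cons]
      simp [pvRuns, hk]

theorem pvGroup_eq_runs (l : List String) : List.foldl pvStepB [] l = pvRuns l := by
  cases l with
  | nil => simp [pvRuns]
  | cons w l' =>
    have h0 : pvStepB [] w = [] ++ [(pvKeyB w, [w])] := by simp [pvStepB]
    simp only [List.foldl_cons, h0, pvFoldl_step l' [] (pvKeyB w) [w]]
    simp [pvRuns]

theorem pvKey_eq_single : pvKeyB = pvSingleA := rfl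

theorem pvCollectA_eq (l : List String) :
    pvCollectA l = (l.takeWhile pvSingleA, l.dropWhile pvSingleA) := by
  induction l with
  | nil => rfl
  | cons w rest ih =>
    by_cases h : pvSingleA w = true <;>
      simp [pvCollectA, h, ih]

theorem pvMergeA_append (g t : List String) (hg : ∀ x ∈ g, pvSingleA x = false) :
    pvMergeA (g ++ t) = g ++ pvMergeA t := by
  induction g with
  | nil => rfl
  | cons x g' ih =>
    have hx : pvSingleA x = false := hg x (by simp)
    simp only [List.cons_append, pvMergeA, hx]
    simp [ih (fun y hy => hg y (by simp [hy]))]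

theorem pvCore_eq : ∀ (n : Nat) (ws : List String), ws.length ≤ n →
    pvMergeA ws = (pvRuns ws).flatMap pvEmitB := by
  intro n
  induction n with
  | zero =>
    intro ws h
    have : ws = [] := by cases ws <;> simp_all
    subst this; simp [pvMergeA, pvRuns]
  | succ n ih =>
    intro ws h
    match ws with
    | [] => simp [pvMergeA, pvRuns]
    | w :: rest =>
      have hrest : rest.length ≤ n := by simp at h; omega
      by_cases hw : pvSingleA w = true
      · -- key true: the run is w followed by the single-char run of rest
        have hpred : (fun x => pvKeyB x == pvKeyB w) = pvSingleA := by
          funext x; simp [pvKey_eq_single, hw]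
        rcases hg : rest.takeWhile pvSingleA with _ | ⟨y, g'⟩
        · -- empty run after w: A keeps w alone; the run is the singleton [w]
          have hdrop : rest.dropWhile pvSingleA = rest := by
            have := List.takeWhile_append_dropWhile (p := pvSingleA) (l := rest)
            rw [hg] at this; simpa using this
          simp only [pvMergeA, hw, pvCollectA_eq, hg, List.length_cons,
            List.length_nil]
          simp only [pvRuns, hpred, hg, hdrop, List.flatMap_cons]
          simp [pvEmitB, pvKey_eq_single, hw, ih rest hrest]
        · -- run of length ≥ 2: both sides join it
          have hdroplen : (rest.dropWhile pvSingleA).length ≤ n := by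
            have := List.length_dropWhile_le pvSingleA rest; omega
          simp only [pvMergeA, hw, pvCollectA_eq, hg]
          simp only [pvRuns, hpred, hg, List.flatMap_cons]
          simp [pvEmitB, pvKey_eq_single, hw, ih _ hdroplen]
      · -- key false: the non-single run passes through unchanged
        have hw' : pvSingleA w = false := by simpa using hw
        have hpred : (fun x => pvKeyB x == pvKeyB w) = (fun x => !pvSingleA x) := by
          funext x
          cases hx : pvSingleA x <;> simp [pvKey_eq_single, hw', hx]
        have hsplit : rest = rest.takeWhile (fun x => !pvSingleA x) ++
            rest.dropWhile (fun x => !pvSingleA x) :=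
          (List.takeWhile_append_dropWhile).symm
        have hmem : ∀ x ∈ rest.takeWhile (fun x => !pvSingleA x), pvSingleA x = false := by
          intro x hx
          simpa using List.mem_takeWhile_imp hx
        have hdroplen : (rest.dropWhile (fun x => !pvSingleA x)).length ≤ n := by
          have := List.length_dropWhile_le (fun x => !pvSingleA x) rest; omega
        simp only [pvMergeA, hw]
        rw [if_neg (by simp [hw'])]
        simp only [pvRuns, hpred, List.flatMap_cons]
        rw [show pvMergeA rest = rest.takeWhile (fun x => !pvSingleA x) ++
              pvMergeA (rest.dropWhile (fun x => !pvSingleA x)) by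
            conv_lhs => rw [hsplit]
            exact pvMergeA_append _ _ hmem]
        simp [pvEmitB, pvKey_eq_single, hw', ih _ hdroplen]

theorem pvMergeA_eq_foldl (ws : List String) :
    pvMergeA ws = (List.foldl pvStepB [] ws).flatMap pvEmitB := by
  rw [pvGroup_eq_runs]; exact pvCore_eq ws.length ws le_rfl

-- ===== VERDICT (by name: the statement is the Claim_ definition above) =====
theorem fix_character_spacing_line_spec : Claim_equal_fix_character_spacing_line := by
  intro line _
  unfold Spec_fix_character_spacing_line fix_character_spacing_line fix_character_spacing_line_alt
  rw [pvKey_eq_single]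
  simp only [pvMergeA_eq_foldl]
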